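-- pv_equiv track=rewrite | github.com/shalini-susmita/data-structure-algorithms-problems | String/string64.py | great_string
-- ===== SOURCE A (Python) =====
-- def case(a,b):
-- 	if b==chr(ord(a)+32) or b==chr(ord(a)-32):
-- 		return True
-- 	return False
--
-- def great_string(s):
-- 	n=''
-- 	i=0
-- 	while i<(len(s)):
-- 		if i==len(s)-1 or case(s[i], s[i+1])==False:
-- 			if n!='' and case(s[i],n[-1])==True:
-- 				n=n[0:len(n)-1] if len(n)>1 else ''
-- 			else:
-- 				n=n+s[i]
-- 			i=i+1
-- 		else:
-- 			i=i+2
-- 	return n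
-- ===== SOURCE B (Python) =====
-- def pair(a, b):
--     return abs(ord(a) - ord(b)) == 32
--
-- def great_string(s):
--     # pass 1: drop adjacent case-pairs directly from the input (A's skip rule)
--     kept = []
--     i = 0
--     n = len(s)
--     while i < n:
--         if i + 1 < n and pair(s[i], s[i + 1]):
--             i += 2
--         else:
--             kept.append(s[i])
--             i += 1
--     # pass 2: stack-reduce the surviving characters
--     st = []
--     for c in kept:
--         if st and pair(st[-1], c):
--             st.pop()
--         else:
--             st.append(c)
--     return ''.join(st)
-- ===== Notes on version B (the rewrite author's own statement) =====
-- stated objective: faster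
-- what changed: Replaces A's single interleaved while-loop that rebuilds the result string by concatenation and slicing with a two-pass design: a first scan that drops adjacent case-pairs, then a list-based stack fold over the survivors, making each step O(1).
-- outside the precondition, e.g. on great_string('a\tb'): A raises ValueError, B returns 'a\tb'; on great_string('\t'): A returns '\t', B returns '\t'
import Mathlib
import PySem

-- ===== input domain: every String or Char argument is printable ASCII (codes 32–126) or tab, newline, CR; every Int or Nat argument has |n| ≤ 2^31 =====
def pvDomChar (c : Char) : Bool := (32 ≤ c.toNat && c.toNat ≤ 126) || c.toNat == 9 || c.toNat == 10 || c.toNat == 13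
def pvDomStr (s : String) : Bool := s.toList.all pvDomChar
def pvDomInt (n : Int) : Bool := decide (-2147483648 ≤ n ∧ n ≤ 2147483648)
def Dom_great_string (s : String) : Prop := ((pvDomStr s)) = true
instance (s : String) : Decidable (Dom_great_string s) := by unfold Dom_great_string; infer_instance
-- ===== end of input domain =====

-- B replaces A's O(n^2) string-concat/slice loop with a two-pass O(n) list-stack reduction (same return value on Pre_).


-- ===== PORT A =====
-- case(a,b): b==chr(ord(a)+32) or b==chr(ord(a)-32); exact for a.toNat ≥ 32 (below that Python's chr raises, excluded by Pre_)
def pyCase (a b : Char) : Bool :=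
  if b == Char.ofNat (a.toNat + 32) || b == Char.ofNat (a.toNat - 32) then true else false

-- the while-loop of A; state n is the built string (as chars), i the index
def greatLoop (cs : List Char) (n : List Char) (i : Nat) : List Char :=
  if i < cs.length then
    if i == cs.length - 1 || pyCase (cs.getD i (Char.ofNat 0)) (cs.getD (i+1) (Char.ofNat 0)) == false then
      let n' :=
        if n ≠ [] ∧ pyCase (cs.getD i (Char.ofNat 0)) (n.getLastD (Char.ofNat 0)) = true then
          -- n[0:len(n)-1] if len(n)>1 else ''
          if 1 < n.length then n.take (n.length - 1) else []
        else n ++ [cs.getD i (Char.ofNat 0)]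
      greatLoop cs n' (i+1)
    else greatLoop cs n (i+2)
  else n
termination_by cs.length - i

def great_string (s : String) : String := String.mk (greatLoop s.toList [] 0)

-- ===== PORT B =====
-- pair(a,b): abs(ord(a)-ord(b)) == 32
def pairB (a b : Char) : Bool := ((a.toNat : Int) - (b.toNat : Int)).natAbs == 32

-- pass 1: the while-loop building `kept` (append = ++ [c])
def keepLoop (cs : List Char) (i : Nat) (kept : List Char) : List Char :=
  if i < cs.length then
    if i + 1 < cs.length && pairB (cs.getD i (Char.ofNat 0)) (cs.getD (i+1) (Char.ofNat 0)) then
      keepLoop cs (i+2) kept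
    else
      keepLoop cs (i+1) (kept ++ [cs.getD i (Char.ofNat 0)])
  else kept
termination_by cs.length - i

-- pass 2: one step of the stack fold (st[-1], st.pop(), st.append(c))
def stackStep (st : List Char) (c : Char) : List Char :=
  if st ≠ [] ∧ pairB (st.getLastD (Char.ofNat 0)) c = true then st.dropLast else st ++ [c]

def great_string_alt (s : String) : String :=
  String.mk (List.foldl stackStep [] (keepLoop s.toList 0 []))

-- ===== PRECONDITION & SPEC =====
-- Pre_ excludes strings containing control characters (tab/newline/CR), on which A's case() can reach
-- chr(ord(a)-32) with a negative argument and raise ValueError.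
def Pre_great_string (s : String) : Prop := (s.toList.all (fun c => 32 ≤ c.toNat)) = true
instance (s : String) : Decidable (Pre_great_string s) := by unfold Pre_great_string; infer_instance
def pvWitness_great_string : String := "abBA!"

def Spec_great_string (s : String) (out : String) : Prop := out = great_string_alt s
instance (s : String) (out : String) : Decidable (Spec_great_string s out) := by unfold Spec_great_string; infer_instance

-- ===== CLAIM (what is proved, stated in full; the proofs are below) =====
def Claim_equal_great_string : Prop := ∀ (s : String), Dom_great_string s → Pre_great_string s → Spec_great_string s (great_string s)

-- ===== LEMMAS AND PROOFS =====

lemma pyCase_eq_pairB (a b : Char) (ha : 32 ≤ a.toNat) (ha' : a.toNat ≤ 126) :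
    pyCase a b = pairB a b := by
  have hv1 : Nat.isValidChar (a.toNat + 32) := Or.inl (by omega)
  have hv2 : Nat.isValidChar (a.toNat - 32) := Or.inl (by omega)
  have h1 : (Char.ofNat (a.toNat + 32)).toNat = a.toNat + 32 := by
    rw [Char.toNat_ofNat, if_pos hv1]
  have h2 : (Char.ofNat (a.toNat - 32)).toNat = a.toNat - 32 := by
    rw [Char.toNat_ofNat, if_pos hv2]
  have hb1 : (b = Char.ofNat (a.toNat + 32)) ↔ (b.toNat = a.toNat + 32) :=
    ⟨fun h => by rw [h, h1], fun h => by rw [← Char.ofNat_toNat b, h]⟩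
  have hb2 : (b = Char.ofNat (a.toNat - 32)) ↔ (b.toNat = a.toNat - 32) :=
    ⟨fun h => by rw [h, h2], fun h => by rw [← Char.ofNat_toNat b, h]⟩
  have key : (b == Char.ofNat (a.toNat + 32) || b == Char.ofNat (a.toNat - 32)) = pairB a b := by
    unfold pairB
    rw [Bool.eq_iff_iff, Bool.or_eq_true, beq_iff_eq, beq_iff_eq, beq_iff_eq, hb1, hb2]
    omega
  unfold pyCase
  rw [key]
  cases pairB a b <;> simp

lemma pairB_comm (a b : Char) : pairB a b = pairB b a := by
  unfold pairB
  rw [Bool.eq_iff_iff, beq_iff_eq, beq_iff_eq]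
  omega

lemma keepLoop_acc (cs : List Char) :
    ∀ (k i : Nat) (acc : List Char), cs.length - i ≤ k →
      keepLoop cs i acc = acc ++ keepLoop cs i [] := by
  intro k
  induction k with
  | zero =>
    intro i acc h
    have hi : ¬ i < cs.length := by omega
    conv_lhs => rw [keepLoop]
    conv_rhs => rw [keepLoop]
    simp [hi]
  | succ k ih =>
    intro i acc h
    rw [keepLoop]
    conv_rhs => rw [keepLoop]
    by_cases hi : i < cs.length
    · simp only [if_pos hi]
      split
      · exact ih (i + 2) acc (by omega)
      · rw [ih (i + 1) (acc ++ [cs.getD i (Char.ofNat 0)]) (by omega),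
            ih (i + 1) ([] ++ [cs.getD i (Char.ofNat 0)]) (by omega)]
        simp
    · simp [hi]

lemma stackStep_eq_inner (n : List Char) (c : Char) (hc : 32 ≤ c.toNat ∧ c.toNat ≤ 126) :
    (if n ≠ [] ∧ pyCase c (n.getLastD (Char.ofNat 0)) = true then
        if 1 < n.length then n.take (n.length - 1) else []
      else n ++ [c]) = stackStep n c := by
  unfold stackStep
  rw [pyCase_eq_pairB c _ hc.1 hc.2, pairB_comm]
  by_cases hcond : n ≠ [] ∧ pairB (n.getLastD (Char.ofNat 0)) c = true
  · rw [if_pos hcond, if_pos hcond]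
    by_cases hlen : 1 < n.length
    · rw [if_pos hlen, List.dropLast_eq_take]
    · rw [if_neg hlen]
      have h1 : n.length = 1 := by
        have := hcond.1
        cases n with
        | nil => simp at this
        | cons x xs => simp at hlen ⊢; omega
      cases n with
      | nil => simp
      | cons x xs =>
        simp at h1
        simp [h1]
  · rw [if_neg hcond, if_neg hcond]

lemma greatLoop_eq (cs : List Char)
    (hcs : ∀ c ∈ cs, 32 ≤ c.toNat ∧ c.toNat ≤ 126) :
    ∀ (k i : Nat) (n : List Char), cs.length - i ≤ k →
      greatLoop cs n i = List.foldl stackStep n (keepLoop cs i []) := by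
  intro k
  induction k with
  | zero =>
    intro i n h
    rw [greatLoop, keepLoop]
    have hi : ¬ i < cs.length := by omega
    simp [hi]
  | succ k ih =>
    intro i n h
    rw [greatLoop]
    conv_rhs => rw [keepLoop]
    by_cases hi : i < cs.length
    · simp only [if_pos hi]
      have hci : cs.getD i (Char.ofNat 0) ∈ cs := by
        rw [List.getD_eq_getElem cs (Char.ofNat 0) hi]
        exact List.getElem_mem hi
      have hb := hcs _ hci
      have hpc : pyCase (cs.getD i (Char.ofNat 0)) (cs.getD (i+1) (Char.ofNat 0))
          = pairB (cs.getD i (Char.ofNat 0)) (cs.getD (i+1) (Char.ofNat 0)) :=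
        pyCase_eq_pairB _ _ hb.1 hb.2
      by_cases hskip : i + 1 < cs.length ∧ pairB (cs.getD i (Char.ofNat 0)) (cs.getD (i+1) (Char.ofNat 0)) = true
      · have hA : (i == cs.length - 1 ||
            pyCase (cs.getD i (Char.ofNat 0)) (cs.getD (i+1) (Char.ofNat 0)) == false) = false := by
          rw [hpc, hskip.2]
          simp
          have h1 := hskip.1
          omega
        have hB : (decide (i + 1 < cs.length) && pairB (cs.getD i (Char.ofNat 0)) (cs.getD (i+1) (Char.ofNat 0))) = true := by
          rw [hskip.2]
          simp [hskip.1]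
        simp only [hA, hB, Bool.false_eq_true, if_false, if_true]
        exact ih (i + 2) n (by omega)
      · have hA : (i == cs.length - 1 ||
            pyCase (cs.getD i (Char.ofNat 0)) (cs.getD (i+1) (Char.ofNat 0)) == false) = true := by
          rw [hpc]
          cases hp : pairB (cs.getD i (Char.ofNat 0)) (cs.getD (i+1) (Char.ofNat 0)) <;> simp
          have h1 : ¬ (i + 1 < cs.length) := fun hlt => hskip ⟨hlt, hp⟩
          omega

        have hB : (decide (i + 1 < cs.length) && pairB (cs.getD i (Char.ofNat 0)) (cs.getD (i+1) (Char.ofNat 0))) = false := by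
          cases hp : pairB (cs.getD i (Char.ofNat 0)) (cs.getD (i+1) (Char.ofNat 0)) <;> simp
          have h1 : ¬ (i + 1 < cs.length) := fun hlt => hskip ⟨hlt, hp⟩
          omega
        simp only [hA, hB, Bool.false_eq_true, if_false, if_true]
        rw [keepLoop_acc cs (cs.length - (i+1)) (i+1) ([] ++ [cs.getD i (Char.ofNat 0)]) (by omega)]
        simp only [List.nil_append, List.singleton_append, List.foldl_cons]
        rw [← stackStep_eq_inner n _ hb]
        exact ih (i + 1) _ (by omega)
    · simp [hi]

-- ===== VERDICT (by name: the statement is the Claim_ definition above) =====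
theorem great_string_spec : Claim_equal_great_string := by
  intro s hdom hpre
  unfold Spec_great_string great_string great_string_alt
  have hcs : ∀ c ∈ s.toList, 32 ≤ c.toNat ∧ c.toNat ≤ 126 := by
    intro c hc
    have h1 : 32 ≤ c.toNat := by
      unfold Pre_great_string at hpre
      rw [List.all_eq_true] at hpre
      simpa using hpre c hc
    have h2 : pvDomChar c = true := by
      unfold Dom_great_string pvDomStr at hdom
      rw [List.all_eq_true] at hdom
      exact hdom c hc
    unfold pvDomChar at h2
    simp only [Bool.or_eq_true, Bool.and_eq_true, decide_eq_true_eq, beq_iff_eq] at h2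
    refine ⟨h1, ?_⟩
    omega
  rw [greatLoop_eq s.toList hcs s.toList.length 0 [] (by omega)]
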